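-- pv_equiv track=rewrite | github.com/kh277/BOJ | 백준/Silver/28995. Перераспределение камней/Перераспределение камней.py | solve
-- ===== SOURCE A (Python) =====
-- def solve(N, A):
--     A.sort()
--     start = 0
--     end = 0
--     result = 0
--     while end < N:
--         gap = A[end] - A[start] + 1
--         if gap > N:
--             start += 1
--         elif gap <= N:
--             result = max(result, end-start+1)
--             end += 1
--
--     return N-result
-- ===== SOURCE B (Python) =====
-- # B: sort, then for each window end binary-search (hand-rolled bisect_left) the
-- # leftmost start with A[end]-A[start]+1 <= N, instead of A's monotonic two-pointer scan.
-- # Like A, sorts the caller's list in place.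
-- def solve(N, A):
--     A.sort()
--     best = 0
--     for end in range(N):
--         t = A[end] - N + 1
--         lo, hi = 0, len(A)
--         while lo < hi:
--             mid = (lo + hi) // 2
--             if A[mid] < t:
--                 lo = mid + 1
--             else:
--                 hi = mid
--         best = max(best, end - lo + 1)
--     return N - best
-- ===== Notes on version B (the rewrite author's own statement) =====
-- stated objective: alternative
-- what changed: Replaced A's monotonic two-pointer while-loop (interleaved start/end moves with shared state) by an independent hand-rolled binary search (bisect_left on the sorted list for threshold A[end]-N+1) for each window end; same sort, same O(n log n) cost dominated by the sort.
import Mathlib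
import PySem

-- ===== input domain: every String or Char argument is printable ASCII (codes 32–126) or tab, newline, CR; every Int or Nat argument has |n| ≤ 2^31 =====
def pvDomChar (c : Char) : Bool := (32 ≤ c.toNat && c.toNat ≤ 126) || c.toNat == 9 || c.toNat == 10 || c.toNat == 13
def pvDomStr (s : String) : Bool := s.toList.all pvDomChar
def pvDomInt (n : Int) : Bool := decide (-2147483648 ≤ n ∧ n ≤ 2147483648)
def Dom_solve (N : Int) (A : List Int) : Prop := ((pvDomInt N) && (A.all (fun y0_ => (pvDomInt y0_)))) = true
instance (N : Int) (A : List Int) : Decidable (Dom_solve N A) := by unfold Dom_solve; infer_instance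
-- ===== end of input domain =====

-- B replaces A's monotonic two-pointer scan by an independent hand-rolled binary search per
-- window end over the sorted list (objective: alternative). Both A and B sort the caller's
-- list in place in Python; the equivalence proved here is about the return value.

-- ===== PORT A =====
-- A's while-loop; indices start/end are nonnegative throughout, so As[i]? is exactly
-- Python's As[i] here (none = IndexError, the path A raises on).
def solveLoopA (As : List Int) (N : Int) (start e : Nat) (result : Int) : Option Int :=
  if _h : (e : Int) < N then
    match h1 : As[e]?, h2 : As[start]? with
    | some ae, some as_ =>
      if ae - as_ + 1 > N then
        solveLoopA As N (start + 1) e result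
      else
        solveLoopA As N start (e + 1) (max result ((e : Int) - (start : Int) + 1))
    | _, _ => none
  else
    some (N - result)
termination_by (As.length - start) + (N.toNat - e)
decreasing_by
  · have : start < As.length := by
      by_contra hc
      simp [List.getElem?_eq_none (by omega : As.length ≤ start)] at h2
    omega
  · omega

def solve (N : Int) (A : List Int) : Int :=
  ((solveLoopA (PySem.List.sorted A (fun x => x) false) N 0 0 0).getD 0)
  -- the .getD 0 is taken only on the IndexError path, which Pre_solve excludes

-- ===== PORT B =====
-- hand-rolled bisect_left from Source B; (lo+hi)//2 on nonnegative ints is Nat division.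
-- The none arm is Python's IndexError path; it is never reached from solve_alt since
-- mid < hi ≤ As.length at every call.
def bsearchB (As : List Int) (t : Int) (lo hi : Nat) : Nat :=
  if _h : lo < hi then
    let mid := (lo + hi) / 2
    match As[mid]? with
    | some v => if v < t then bsearchB As t (mid + 1) hi else bsearchB As t lo mid
    | none => lo
  else lo
termination_by hi - lo
decreasing_by all_goals omega

def solve_alt (N : Int) (A : List Int) : Int :=
  let As := PySem.List.sorted A (fun x => x) false
  let best := (PySem.List.pyRange 0 N 1).foldl (fun best e =>
      match PySem.List.pyGet? As e with
      | some ae => max best (e - (bsearchB As (ae - N + 1) 0 As.length : Int) + 1)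
      | none => best) 0
  N - best

-- ===== PRECONDITION & SPEC =====
-- Python A indexes A[end] for every end < N, so it raises IndexError exactly when N > len(A);
-- Pre_solve admits every input A returns on.
def Pre_solve (N : Int) (A : List Int) : Prop := N ≤ (A.length : Int)
instance (N : Int) (A : List Int) : Decidable (Pre_solve N A) := by unfold Pre_solve; infer_instance

def pvWitness_solve : Int × List Int := (3, [1, 5, 2, 9])

def Spec_solve (N : Int) (A : List Int) (out : Int) : Prop := out = solve_alt N A
instance (N : Int) (A : List Int) (out : Int) : Decidable (Spec_solve N A out) := by unfold Spec_solve; infer_instance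

-- ===== CLAIM (what is proved, stated in full; the proofs are below) =====
def Claim_equal_solve : Prop := ∀ (N : Int) (A : List Int), Dom_solve N A → Pre_solve N A → Spec_solve N A (solve N A)

-- ===== LEMMAS AND PROOFS =====

-- the "cut point" of threshold t in As: everything strictly below it is < t, everything at
-- or above it is ≥ t.  bisect_left computes it, and it is unique.
def Cut (As : List Int) (t : Int) (r : Nat) : Prop :=
  r ≤ As.length ∧ (∀ i (h : i < As.length), i < r → As[i] < t) ∧
    (∀ j (h : j < As.length), r ≤ j → t ≤ As[j])

theorem cut_unique {As : List Int} {t : Int} {r r' : Nat}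
    (h : Cut As t r) (h' : Cut As t r') : r = r' := by
  obtain ⟨hr, hlo, hhi⟩ := h
  obtain ⟨hr', hlo', hhi'⟩ := h'
  by_contra hne
  rcases Nat.lt_or_ge r r' with hlt | hge
  · have h1 := hlo' r (by omega) hlt
    have h2 := hhi r (by omega) (le_refl r)
    omega
  · have hlt : r' < r := by omega
    have h1 := hlo r' (by omega) hlt
    have h2 := hhi' r' (by omega) (le_refl r')
    omega

theorem bsearchB_cut (As : List Int) (t : Int)
    (hmono : ∀ p q (hpq : p ≤ q) (hq : q < As.length), As[p]'(by omega) ≤ As[q]) :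
    ∀ m lo hi, hi - lo ≤ m → lo ≤ hi → hi ≤ As.length →
      (∀ i (h : i < As.length), i < lo → As[i] < t) →
      (∀ j (h : j < As.length), hi ≤ j → t ≤ As[j]) →
      Cut As t (bsearchB As t lo hi) := by
  intro m
  induction m with
  | zero =>
    intro lo hi hm hlh hhl hpre hpost
    have he : lo = hi := by omega
    rw [bsearchB]
    simp only [lt_irrefl, he, dite_false]
    exact ⟨by omega, fun i h hi => hpre i h (by omega), fun j h hj => hpost j h (by omega)⟩
  | succ m ih =>
    intro lo hi hm hlh hhl hpre hpost
    rw [bsearchB]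
    by_cases hlt : lo < hi
    · simp only [hlt, dite_true]
      have hmid : (lo + hi) / 2 < As.length := by omega
      rw [List.getElem?_eq_getElem hmid]
      simp only
      by_cases hv : As[(lo + hi) / 2] < t
      · simp only [hv, if_true]
        apply ih ((lo + hi) / 2 + 1) hi (by omega) (by omega) hhl
        · intro i h hi'
          rcases Nat.lt_or_ge i lo with h1 | h1
          · exact hpre i h h1
          · exact lt_of_le_of_lt (hmono i ((lo + hi) / 2) (by omega) hmid) hv
        · exact hpost
      · simp only [hv, if_false]
        apply ih lo ((lo + hi) / 2) (by omega) (by omega) (by omega) hpre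
        intro j h hj
        exact le_trans (by omega) (hmono ((lo + hi) / 2) j hj h)
    · simp only [hlt, dite_false]
      have he : lo = hi := by omega
      exact ⟨by omega, fun i h hi => hpre i h (by omega),
             fun j h hj => hpost j h (by omega)⟩

-- B's per-element fold function
def gB (As : List Int) (N : Int) : Int → Int → Int := fun best e =>
  match PySem.List.pyGet? As e with
  | some ae => max best (e - (bsearchB As (ae - N + 1) 0 As.length : Int) + 1)
  | none => best

-- A's while-loop computes exactly B's fold over the remaining range, under the
-- two-pointer invariant on start.
theorem loop_char (As : List Int) (N : Int)
    (hmono : ∀ p q (hpq : p ≤ q) (hq : q < As.length), As[p]'(by omega) ≤ As[q])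
    (hN : N ≤ (As.length : Int)) :
    ∀ m start e result, (As.length - start) + (N.toNat - e) ≤ m →
      ((e : Int) < N → start ≤ e ∧
        ∀ i (h : i < As.length), i < start → As[i] < As.getD e 0 - N + 1) →
      solveLoopA As N start e result =
        some (N - (PySem.List.pyRange (e : Int) N 1).foldl (gB As N) result) := by
  intro m
  induction m with
  | zero =>
    intro start e result hm hinv
    have hnot : ¬ ((e : Int) < N) := by
      intro h
      have : e < N.toNat := by omega
      omega
    rw [solveLoopA]
    simp only [hnot, dite_false]
    rw [PySem.List.pyRange_one_eq_nil (by omega)]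
    rfl
  | succ m ih =>
    intro start e result hm hinv
    rw [solveLoopA]
    by_cases hlt : (e : Int) < N
    · simp only [hlt, dite_true]
      obtain ⟨hse, hstart⟩ := hinv hlt
      have heN : e < N.toNat := by omega
      have helen : e < As.length := by omega
      have hslen : start < As.length := by omega
      rw [List.getElem?_eq_getElem helen, List.getElem?_eq_getElem hslen]
      simp only
      by_cases hgap : As[e] - As[start] + 1 > N
      · -- start advances: As[start] < threshold, and start < e
        simp only [hgap, if_true]
        have hse' : start < e := by
          by_contra hc
          have : start = e := by omega
          subst this
          omega
        have hth : As.getD e 0 = As[e] := List.getD_eq_getElem As 0 helen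
        apply ih (start + 1) e result (by omega)
        intro _
        refine ⟨by omega, ?_⟩
        intro i h hi
        rcases Nat.lt_or_ge i start with h1 | h1
        · exact hstart i h h1
        · have hie : i = start := by omega
          subst hie
          rw [hth]
          omega
      · -- window recorded: start is exactly the cut point, i.e. B's binary search result
        simp only [hgap, if_false]
        have hth : As.getD e 0 = As[e] := List.getD_eq_getElem As 0 helen
        have hcutA : Cut As (As[e] - N + 1) start := by
          refine ⟨by omega, ?_, ?_⟩
          · intro i h hi
            have := hstart i h hi
            omega
          · intro j h hj
            have h1 : As[start] ≤ As[j] := hmono start j hj h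
            omega
        have hcutB : Cut As (As[e] - N + 1) (bsearchB As (As[e] - N + 1) 0 As.length) := by
          apply bsearchB_cut As _ hmono As.length 0 As.length (by omega) (by omega) (le_refl _)
          · intro i h hi; omega
          · intro j h hj; omega
        have hbs : bsearchB As (As[e] - N + 1) 0 As.length = start :=
          cut_unique hcutB hcutA
        rw [PySem.List.pyRange_one_cons hlt]
        rw [List.foldl_cons]
        have hg : gB As N result (e : Int) = max result ((e : Int) - (start : Int) + 1) := by
          unfold gB
          rw [PySem.List.pyGet?_natCast, List.getElem?_eq_getElem helen]
          simp only [hbs]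
        rw [hg]
        have := ih start (e + 1) (max result ((e : Int) - (start : Int) + 1)) (by omega) ?_
        · rw [this]
          norm_num
        · intro hlt'
          refine ⟨by omega, ?_⟩
          intro i h hi
          have h1 := hstart i h hi
          have h2 : e + 1 < As.length := by omega
          have h3 : As[e] ≤ As[e + 1] := hmono e (e + 1) (by omega) h2
          rw [List.getD_eq_getElem As 0 h2] at *
          rw [hth] at h1
          omega
    · simp only [hlt, dite_false]
      rw [PySem.List.pyRange_one_eq_nil (by omega)]
      rfl

-- ===== VERDICT (by name: the statement is the Claim_ definition above) =====
theorem solve_spec : Claim_equal_solve := by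
  intro N A _ hpre
  unfold Spec_solve solve solve_alt
  set As := PySem.List.sorted A (fun x => x) false with hAs
  have hlen : As.length = A.length := PySem.List.length_sorted A (fun x => x) false
  have hmono : ∀ p q (hpq : p ≤ q) (hq : q < As.length), As[p]'(by omega) ≤ As[q] := by
    intro p q hpq hq
    exact PySem.List.sorted_id_getElem_mono A hpq hq
  have hN : N ≤ (As.length : Int) := by
    rw [hlen]; exact hpre
  have h := loop_char As N hmono hN ((As.length - 0) + (N.toNat - 0)) 0 0 0 (le_refl _)
    (by intro _; exact ⟨le_refl _, by intro i h hi; omega⟩)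
  rw [Nat.cast_zero] at h
  rw [h]
  simp only [Option.getD_some]
  rfl
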